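-- pv_equiv track=rewrite | github.com/PerrinWaldock/aoc2023 | day12/sln2.py | removeFromGroup
-- ===== SOURCE A (Python) =====
-- def removeFromGroup(num, group):
-- 	 #NOTE: negative numbers mean a problem
-- 	if len(group) == 0:
-- 		return (-1,)
-- 	elif group[0] >= num:
-- 		newgroup = (group[0]-num,) + group[1:]
-- 		return newgroup
-- 	else:
-- 		return removeFromGroup(num - group[0], group[1:])
-- ===== SOURCE B (Python) =====
-- def removeFromGroup(num, group):
--     remaining = num
--     for i in range(len(group)):
--         if group[i] >= remaining:
--             return (group[i] - remaining,) + group[i+1:]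
--         remaining -= group[i]
--     return (-1,)
-- ===== Notes on version B (the rewrite author's own statement) =====
-- stated objective: faster
-- what changed: Replaced the recursive walk, which copies a tuple slice group[1:] at every recursion level (O(n^2) total), with one explicit index loop that threads the running remainder in a local variable and slices only once at the answer (O(n)).
import Mathlib
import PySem

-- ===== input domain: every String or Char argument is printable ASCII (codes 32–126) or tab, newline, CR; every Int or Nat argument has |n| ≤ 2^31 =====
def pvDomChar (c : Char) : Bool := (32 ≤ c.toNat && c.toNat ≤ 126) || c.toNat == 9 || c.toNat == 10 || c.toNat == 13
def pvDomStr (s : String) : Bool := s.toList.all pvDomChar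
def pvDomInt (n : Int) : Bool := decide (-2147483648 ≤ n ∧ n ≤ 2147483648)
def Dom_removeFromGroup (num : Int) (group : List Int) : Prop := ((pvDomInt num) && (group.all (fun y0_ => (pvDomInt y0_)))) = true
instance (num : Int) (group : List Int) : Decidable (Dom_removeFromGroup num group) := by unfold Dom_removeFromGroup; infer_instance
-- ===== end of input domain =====

-- B rewrites A's tail recursion as one explicit index loop threading the remainder (objective: faster — no per-step suffix copies).

-- ===== PORT A =====
-- literal port of A: recursion on the tail of the list, subtracting the head from num
def removeFromGroup (num : Int) (group : List Int) : List Int :=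
  match group with
  | [] => [-1]
  | g :: rest =>
    if g ≥ num then (g - num) :: rest
    else removeFromGroup (num - g) rest

-- ===== PORT B =====
-- literal port of B: `for i in range(len(group))` with mutable `remaining`; slice group[i+1:]
def removeFromGroup_altLoop (group : List Int) (remaining : Int) (i : Nat) : List Int :=
  if h : i < group.length then
    if group[i] ≥ remaining then (group[i] - remaining) :: group.drop (i + 1)
    else removeFromGroup_altLoop group (remaining - group[i]) (i + 1)
  else [-1]
termination_by group.length - i

def removeFromGroup_alt (num : Int) (group : List Int) : List Int :=
  removeFromGroup_altLoop group num 0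

-- ===== PRECONDITION & SPEC =====
def Spec_removeFromGroup (num : Int) (group : List Int) (out : List Int) : Prop := out = removeFromGroup_alt num group
instance (num : Int) (group : List Int) (out : List Int) : Decidable (Spec_removeFromGroup num group out) := by unfold Spec_removeFromGroup; infer_instance

-- ===== CLAIM (what is proved, stated in full; the proofs are below) =====
def Claim_equal_removeFromGroup : Prop := ∀ (num : Int) (group : List Int), Dom_removeFromGroup num group → Spec_removeFromGroup num group (removeFromGroup num group)

-- ===== LEMMAS AND PROOFS =====

-- B's loop from index i computes A on the suffix group.drop i
theorem altLoop_eq_drop (group : List Int) (i : Nat) (remaining : Int) :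
    removeFromGroup_altLoop group remaining i = removeFromGroup remaining (group.drop i) := by
  by_cases h : i < group.length
  · rw [removeFromGroup_altLoop]
    have hd : group.drop i = group[i] :: group.drop (i + 1) := List.drop_eq_getElem_cons h
    rw [hd, removeFromGroup]
    simp only [h, dif_pos]
    by_cases hg : group[i] ≥ remaining
    · simp [hg]
    · simp only [hg, if_false]
      exact altLoop_eq_drop group (i + 1) (remaining - group[i])
  · rw [removeFromGroup_altLoop]
    simp only [h, dif_neg, not_false_iff]
    rw [List.drop_eq_nil_of_le (by omega), removeFromGroup]
termination_by group.length - i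

-- ===== VERDICT (by name: the statement is the Claim_ definition above) =====
theorem removeFromGroup_spec : Claim_equal_removeFromGroup := by
  intro num group _
  unfold Spec_removeFromGroup removeFromGroup_alt
  rw [altLoop_eq_drop, List.drop_zero]
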